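-- pv_equiv track=rewrite | github.com/riffluv/work1 | scripts/check-rendered-closed-followup.py | split_sections
-- ===== SOURCE A (Python) =====
-- def split_sections(rendered: str) -> list[str]:
--     sections: list[str] = []
--     current: list[str] = []
--     for raw_line in rendered.splitlines():
--         line = raw_line.strip()
--         if not line:
--             if current:
--                 sections.append("\n".join(current))
--                 current = []
--             continue
--         current.append(line)
--     if current:
--         sections.append("\n".join(current))
--     return sections
-- ===== SOURCE B (Python) =====
-- from itertools import groupby
--
--
-- def split_sections(rendered: str) -> list[str]:
--     lines = (line.strip() for line in rendered.splitlines())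
--     return ["\n".join(group) for key, group in groupby(lines, key=bool) if key]
-- ===== Notes on version B (the rewrite author's own statement) =====
-- stated objective: idiomatic
-- what changed: Replaces the explicit sections/current accumulator state machine with itertools.groupby over stripped lines keyed on truthiness, joining each non-blank run.
import Mathlib
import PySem

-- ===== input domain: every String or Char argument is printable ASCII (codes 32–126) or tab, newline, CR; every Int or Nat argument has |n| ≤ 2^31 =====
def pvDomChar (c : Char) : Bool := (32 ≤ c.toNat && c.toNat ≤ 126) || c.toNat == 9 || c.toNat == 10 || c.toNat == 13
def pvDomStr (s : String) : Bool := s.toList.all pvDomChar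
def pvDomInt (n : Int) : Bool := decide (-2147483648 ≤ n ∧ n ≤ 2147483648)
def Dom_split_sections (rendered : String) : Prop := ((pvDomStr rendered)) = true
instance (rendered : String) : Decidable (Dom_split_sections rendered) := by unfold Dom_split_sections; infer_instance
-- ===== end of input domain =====

-- B replaces A's explicit sections/current accumulator state machine with a groupby-style
-- grouping of stripped lines into maximal non-blank runs (idiomatic decomposition; same cost).


-- ===== PORT A =====
-- the for-loop with its (sections, current) state, blank lines flushing current
def splitSectionsLoop : List String → List String → List String → List String
  | [], sections, current =>
      if current ≠ [] then sections ++ [PySem.Str.join "\n" current] else sections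
  | raw :: rest, sections, current =>
      let line := PySem.Str.strip raw
      if line = "" then
        (if current ≠ [] then splitSectionsLoop rest (sections ++ [PySem.Str.join "\n" current]) []
         else splitSectionsLoop rest sections current)
      else splitSectionsLoop rest sections (current ++ [line])

def split_sections (rendered : String) : List String :=
  splitSectionsLoop (PySem.Str.splitlines rendered) [] []

-- ===== PORT B =====
-- groupby(lines, key=bool): skip blank runs, join each maximal non-blank run
def splitSectionsGroups : List String → List String
  | [] => []
  | l :: rest =>
      if l = "" then splitSectionsGroups rest
      else
        PySem.Str.join "\n" (l :: rest.takeWhile (· ≠ "")) ::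
          splitSectionsGroups (rest.dropWhile (· ≠ ""))
termination_by ls => ls.length
decreasing_by
  · simp
  · have := rest.length_dropWhile_le (p := (· ≠ ""))
    simp only [List.length_cons]
    omega

def split_sections_alt (rendered : String) : List String :=
  splitSectionsGroups ((PySem.Str.splitlines rendered).map PySem.Str.strip)

-- ===== PRECONDITION & SPEC =====
def Spec_split_sections (rendered : String) (out : List String) : Prop := out = split_sections_alt rendered
instance (rendered : String) (out : List String) : Decidable (Spec_split_sections rendered out) := by unfold Spec_split_sections; infer_instance

-- ===== CLAIM (what is proved, stated in full; the proofs are below) =====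
def Claim_equal_split_sections : Prop := ∀ (rendered : String), Dom_split_sections rendered → Spec_split_sections rendered (split_sections rendered)

-- ===== LEMMAS AND PROOFS =====
-- loop invariant: A's state machine equals the grouping view of the remaining stripped lines
theorem splitSectionsLoop_eq (ls : List String) :
    ∀ (sections current : List String),
    splitSectionsLoop ls sections current =
      sections ++
        (if current = [] then splitSectionsGroups (ls.map PySem.Str.strip)
         else PySem.Str.join "\n" (current ++ (ls.map PySem.Str.strip).takeWhile (· ≠ "")) ::
              splitSectionsGroups ((ls.map PySem.Str.strip).dropWhile (· ≠ ""))) := by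
  induction ls with
  | nil =>
      intro sections current
      by_cases h : current = [] <;>
        simp [splitSectionsLoop, splitSectionsGroups, h]
  | cons raw rest ih =>
      intro sections current
      by_cases hl : PySem.Str.strip raw = ""
      · by_cases h : current = []
        · simp [splitSectionsLoop, hl, h, ih, splitSectionsGroups]
        · simp [splitSectionsLoop, hl, h, ih, splitSectionsGroups]
      · by_cases h : current = []
        · simp [splitSectionsLoop, hl, h, ih, splitSectionsGroups]
        · have hne : current ++ [PySem.Str.strip raw] ≠ [] := by simp
          simp [splitSectionsLoop, hl, h, ih, hne]

-- ===== VERDICT (by name: the statement is the Claim_ definition above) =====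
theorem split_sections_spec : Claim_equal_split_sections := by
  intro rendered _
  unfold Spec_split_sections split_sections split_sections_alt
  simp [splitSectionsLoop_eq]
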